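-- pv_equiv track=rewrite | github.com/raikoug/adventofcode | 2023/Solutions/Python/day_14_part_2.py | tilt_to_right_platform
-- ===== SOURCE A (Python) =====
-- def tilt_to_right_platform(platform: list) -> list:
--     """
--        given a list of line line like this: .#O.#O....
--          make the O roll to right untill it hits a #, a O or EOL
--          then return the new list of lines
--     """
--     new_platform = list()
--     for line in platform:
--         # split line by "#"
--         sub_lines = line.split("#")
--         new_parts = list()
--         # for each sub_line i create the line again putting the O at the end, filling with "." if needed
--         for part in sub_lines:
--             if part == '':
--                 new_parts.append(part)
--                 continue
--
--             Os = part.count("O")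
--             part = f"{'O'*Os:.>{len(part)}}"
--             new_parts.append(part)
--             # replace the part in the original line
--
--         new_line = "#".join(new_parts)
--         new_platform.append(new_line)
--     return new_platform
-- ===== SOURCE B (Python) =====
-- def tilt_to_right_platform(platform: list) -> list:
--     """Single streaming pass per line: no split, count segment length and O's,
--     flush '.'*(seg_len-os) + 'O'*os at each '#' and at end of line."""
--     result = []
--     for line in platform:
--         out = []
--         seg_len = 0
--         os = 0
--         for ch in line:
--             if ch == '#':
--                 out.append('.' * (seg_len - os) + 'O' * os + '#')
--                 seg_len = 0
--                 os = 0
--             else: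
--                 seg_len += 1
--                 if ch == 'O':
--                     os += 1
--         out.append('.' * (seg_len - os) + 'O' * os)
--         result.append(''.join(out))
--     return result
-- ===== Notes on version B (the rewrite author's own statement) =====
-- stated objective: simpler
-- what changed: Replaces split('#')/per-part format-and-pad/'#'.join with one streaming left-to-right pass per line that keeps segment-length and O counters and flushes '.'*(seg_len-os)+'O'*os at each '#' and at end of line.
import Mathlib
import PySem

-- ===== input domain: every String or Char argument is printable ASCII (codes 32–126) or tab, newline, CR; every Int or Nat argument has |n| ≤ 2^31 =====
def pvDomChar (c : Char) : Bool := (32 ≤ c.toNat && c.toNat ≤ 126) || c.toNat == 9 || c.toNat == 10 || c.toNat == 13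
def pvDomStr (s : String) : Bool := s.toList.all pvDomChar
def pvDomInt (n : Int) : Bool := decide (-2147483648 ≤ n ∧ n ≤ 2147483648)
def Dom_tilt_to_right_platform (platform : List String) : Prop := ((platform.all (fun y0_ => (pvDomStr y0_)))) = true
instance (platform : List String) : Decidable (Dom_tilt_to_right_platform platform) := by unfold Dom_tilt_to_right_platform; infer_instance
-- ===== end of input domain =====

-- B replaces A's split/pad-each-part/join by a single streaming pass per line with two counters; same output, proved equal on all inputs.

-- ===== PORT A =====
def tilt_to_right_platform (platform : List String) : List String :=
  platform.foldl (fun new_platform line =>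
    -- line.split("#"): sep is the non-empty literal "#", so split? is always `some`
    let sub_lines := (PySem.Str.split? line "#").getD []
    let new_parts := sub_lines.foldl (fun new_parts part =>
      if part == "" then new_parts ++ [part]
      else
        let Os := PySem.Str.count part "O"
        -- f"{'O'*Os:.>{len(part)}}": 'O'*Os right-aligned to width len(part), filled with '.';
        -- exact here: Nat subtraction clamps at 0 exactly like Python's no-padding case
        let part := String.ofList (List.replicate ((PySem.Str.len part).toNat - Os) '.' ++ List.replicate Os 'O')
        new_parts ++ [part]) ([] : List String)
    new_platform ++ [PySem.Str.join "#" new_parts]) []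

-- ===== PORT B =====
-- Source B's inner for-loop over the characters of `line` with state (out, seg_len, os);
-- ''.join of the appended pieces is ported as direct concatenation onto `out`.
def tiltGoB : List Char → List Char → Nat → Nat → List Char
  | [], out, segLen, os => out ++ (List.replicate (segLen - os) '.' ++ List.replicate os 'O')
  | c :: cs, out, segLen, os =>
    if c = '#' then
      tiltGoB cs (out ++ (List.replicate (segLen - os) '.' ++ List.replicate os 'O' ++ ['#'])) 0 0
    else
      tiltGoB cs out (segLen + 1) (os + if c = 'O' then 1 else 0)

def tilt_to_right_platform_alt (platform : List String) : List String :=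
  platform.map (fun line => String.ofList (tiltGoB line.toList [] 0 0))

-- ===== PRECONDITION & SPEC =====
def Spec_tilt_to_right_platform (platform : List String) (out : List String) : Prop := out = tilt_to_right_platform_alt platform
instance (platform : List String) (out : List String) : Decidable (Spec_tilt_to_right_platform platform out) := by unfold Spec_tilt_to_right_platform; infer_instance

-- ===== CLAIM (what is proved, stated in full; the proofs are below) =====
def Claim_equal_tilt_to_right_platform : Prop := ∀ (platform : List String), Dom_tilt_to_right_platform platform → Spec_tilt_to_right_platform platform (tilt_to_right_platform platform)

-- ===== LEMMAS AND PROOFS =====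

-- structural characterisation of splitting a char list at '#'
def pvSplitp : List Char → List Char × List (List Char)
  | [] => ([], [])
  | c :: cs =>
    let p := pvSplitp cs
    if c = '#' then ([], p.1 :: p.2) else (c :: p.1, p.2)

-- the tilted form of one '#'-free segment, determined by its length and its number of 'O's
def pvSeg (len os : Nat) : List Char := List.replicate (len - os) '.' ++ List.replicate os 'O'

theorem pvSplitOn_go_eq : ∀ (l : List Char) (fuel : Nat) (cur : List Char) (acc : List (List Char)),
    l.length ≤ fuel →
    PySem.Chars.splitOn.go ['#'] fuel l cur acc
      = acc.reverse ++ (cur.reverse ++ (pvSplitp l).1) :: (pvSplitp l).2 := by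
  intro l
  induction l with
  | nil =>
    intro fuel cur acc h
    cases fuel <;> simp [PySem.Chars.splitOn.go, pvSplitp]
  | cons c cs ih =>
    intro fuel cur acc h
    cases fuel with
    | zero => simp at h
    | succ f =>
      have hf : cs.length ≤ f := by simpa using h
      by_cases hc : c = '#'
      · subst hc
        have hpre : (['#'].isPrefixOf ('#' :: cs)) = true := by
          simp [List.isPrefixOf]
        simp only [PySem.Chars.splitOn.go, hpre, if_true]
        have hdrop : List.drop (['#'] : List Char).length ('#' :: cs) = cs := by simp
        rw [hdrop, ih f [] (cur.reverse :: acc) hf]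
        simp [pvSplitp]
      · have hpre : (['#'].isPrefixOf (c :: cs)) = false := by
          simp [List.isPrefixOf]
          exact fun h' => absurd h'.symm hc
        simp only [PySem.Chars.splitOn.go, hpre, Bool.false_eq_true, if_false]
        rw [ih f (c :: cur) acc hf]
        simp [pvSplitp, hc]

theorem pvSplitOn_eq (l : List Char) :
    PySem.Chars.splitOn l ['#'] = (pvSplitp l).1 :: (pvSplitp l).2 := by
  unfold PySem.Chars.splitOn
  simpa using pvSplitOn_go_eq l (l.length + 1) [] [] (by omega)

theorem pvCount_go_eq : ∀ (l : List Char) (fuel : Nat) (acc : Nat),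
    l.length ≤ fuel →
    PySem.Chars.count.go ['O'] fuel l acc = acc + l.count 'O' := by
  intro l
  induction l with
  | nil => intro fuel acc h; cases fuel <;> simp [PySem.Chars.count.go]
  | cons c cs ih =>
    intro fuel acc h
    cases fuel with
    | zero => simp at h
    | succ f =>
      have hf : cs.length ≤ f := by simpa using h
      by_cases hc : c = 'O'
      · subst hc
        have hpre : (['O'].isPrefixOf ('O' :: cs)) = true := by simp [List.isPrefixOf]
        simp only [PySem.Chars.count.go, hpre, if_true]
        have hdrop : List.drop (['O'] : List Char).length ('O' :: cs) = cs := by simp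
        rw [hdrop, ih f (acc + 1) hf]
        simp
        omega
      · have hpre : (['O'].isPrefixOf (c :: cs)) = false := by
          simp [List.isPrefixOf]
          exact fun h' => absurd h'.symm hc
        simp only [PySem.Chars.count.go, hpre, Bool.false_eq_true, if_false]
        rw [ih f acc hf]
        simp [hc]

theorem pvCount_eq (l : List Char) : PySem.Chars.count l ['O'] = l.count 'O' := by
  unfold PySem.Chars.count
  simpa using pvCount_go_eq l l.length 0 (le_refl _)

-- B's loop invariant: the pending segment merges into the head of the remaining split
theorem pvTiltGoB_eq : ∀ (cs out : List Char) (l o : Nat),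
    tiltGoB cs out l o
      = out ++ PySem.Chars.join ['#']
          (pvSeg (l + (pvSplitp cs).1.length) (o + (pvSplitp cs).1.count 'O')
            :: (pvSplitp cs).2.map (fun p => pvSeg p.length (p.count 'O'))) := by
  intro cs
  induction cs with
  | nil =>
    intro out l o
    simp [tiltGoB, pvSplitp, PySem.Chars.join_singleton, pvSeg]
  | cons c cs ih =>
    intro out l o
    by_cases hc : c = '#'
    · subst hc
      simp only [tiltGoB, if_true]
      rw [ih]
      simp only [pvSplitp, if_true]
      rw [List.map_cons, PySem.Chars.join_cons_cons]
      simp [pvSeg, List.append_assoc]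
    · simp only [tiltGoB, hc, if_false]
      rw [ih]
      simp only [pvSplitp, hc, if_false]
      have hlen : (l + 1) + (pvSplitp cs).1.length = l + (c :: (pvSplitp cs).1).length := by
        simp; omega
      have hcnt : (o + if c = 'O' then 1 else 0) + (pvSplitp cs).1.count 'O'
          = o + (c :: (pvSplitp cs).1).count 'O' := by
        simp [List.count_cons]
        by_cases h2 : c = 'O'
        · simp [h2]; omega
        · simp [h2]
      rw [hlen, hcnt]

-- what A does to one part (a '#'-free segment given as a char list)
theorem pvPartA_eq (p : List Char) :
    (if String.ofList p == "" then String.ofList p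
     else String.ofList (List.replicate ((PySem.Str.len (String.ofList p)).toNat
            - PySem.Str.count (String.ofList p) "O") '.'
          ++ List.replicate (PySem.Str.count (String.ofList p) "O") 'O'))
      = String.ofList (pvSeg p.length (p.count 'O')) := by
  by_cases hp : p = []
  · subst hp; simp [pvSeg]
  · have h1 : (String.ofList p == "") = false := by
      simp only [beq_eq_false_iff_ne, ne_eq]
      intro h
      exact hp (by simpa using congrArg String.toList h)
    rw [if_neg (by simp [h1])]
    have h2 : PySem.Str.count (String.ofList p) "O" = p.count 'O' := by
      rw [PySem.Str.count_eq]
      simpa using pvCount_eq p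
    have h3 : (PySem.Str.len (String.ofList p)).toNat = p.length := by
      rw [PySem.Str.len_eq]; simp
    rw [h2, h3]
    rfl

-- one full line: A's split/pad/join equals B's streaming pass
theorem pvLine_eq (line : String) :
    PySem.Str.join "#" (((PySem.Str.split? line "#").getD []).foldl (fun new_parts part =>
        if part == "" then new_parts ++ [part]
        else new_parts ++ [String.ofList
          (List.replicate ((PySem.Str.len part).toNat - PySem.Str.count part "O") '.'
            ++ List.replicate (PySem.Str.count part "O") 'O')]) ([] : List String))
      = String.ofList (tiltGoB line.toList [] 0 0) := by
  have hsplit : (PySem.Str.split? line "#").getD []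
      = ((pvSplitp line.toList).1 :: (pvSplitp line.toList).2).map String.ofList := by
    simp [PySem.Str.split?, PySem.Chars.split?, pvSplitOn_eq]
  rw [hsplit]
  have hfold : ∀ (parts : List (List Char)) (acc : List String),
      (parts.map String.ofList).foldl (fun new_parts part =>
        if part == "" then new_parts ++ [part]
        else new_parts ++ [String.ofList
          (List.replicate ((PySem.Str.len part).toNat - PySem.Str.count part "O") '.'
            ++ List.replicate (PySem.Str.count part "O") 'O')]) acc
      = acc ++ parts.map (fun p => String.ofList (pvSeg p.length (p.count 'O'))) := by
    intro parts
    induction parts with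
    | nil => intro acc; simp
    | cons p rest ih =>
      intro acc
      have hp := pvPartA_eq p
      simp only [List.map_cons, List.foldl_cons]
      by_cases hq : (String.ofList p == "") = true
      · rw [if_pos hq, ih]
        rw [if_pos hq] at hp
        rw [hp]
        simp
      · rw [if_neg hq, ih]
        rw [if_neg hq] at hp
        rw [hp]
        simp
  rw [hfold, pvTiltGoB_eq]
  simp only [List.nil_append, Nat.zero_add]
  rw [PySem.Str.join]
  refine congrArg String.ofList ?_
  rw [show ("#" : String).toList = ['#'] from rfl]
  simp [List.map_map, Function.comp_def]

-- ===== VERDICT (by name: the statement is the Claim_ definition above) =====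
theorem tilt_to_right_platform_spec : Claim_equal_tilt_to_right_platform := by
  intro platform _
  unfold Spec_tilt_to_right_platform
  simp only [tilt_to_right_platform, tilt_to_right_platform_alt]
  rw [PySem.List.foldl_append_singleton_eq_map]
  simp only [List.nil_append]
  apply List.map_congr_left
  intro line _
  exact pvLine_eq line
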